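-- pv_equiv track=rewrite | github.com/kaiwulf/probs | python/days_of_week.py | solution
-- ===== SOURCE A (Python) =====
-- def solution(X, Y, A):
--     N = len(A)
--     result = -1
--     nX = 0
--     nY = 0
--     for i in range(N):
--         if A[i] == X:
--             nX += 1
--         if A[i] == Y:
--             nY += 1
--         if nX == nY:
--             result = i
--     return result
-- ===== SOURCE B (Python) =====
-- def solution(X, Y, A):
--     # Phase 1: build the running prefix-difference table count(X)-count(Y).
--     diffs = []
--     s = 0
--     for a in A:
--         s += (a == X) - (a == Y)
--         diffs.append(s)
--     # Phase 2: scan the table from the right; first zero is the answer.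
--     for i in range(len(diffs) - 1, -1, -1):
--         if diffs[i] == 0:
--             return i
--     return -1
-- ===== Notes on version B (the rewrite author's own statement) =====
-- stated objective: alternative
-- what changed: B builds the prefix count-difference table in one pass, then searches it from the right for the last zero, instead of A's interleaved counting with two counters and a last-match register updated forward.
import Mathlib
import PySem

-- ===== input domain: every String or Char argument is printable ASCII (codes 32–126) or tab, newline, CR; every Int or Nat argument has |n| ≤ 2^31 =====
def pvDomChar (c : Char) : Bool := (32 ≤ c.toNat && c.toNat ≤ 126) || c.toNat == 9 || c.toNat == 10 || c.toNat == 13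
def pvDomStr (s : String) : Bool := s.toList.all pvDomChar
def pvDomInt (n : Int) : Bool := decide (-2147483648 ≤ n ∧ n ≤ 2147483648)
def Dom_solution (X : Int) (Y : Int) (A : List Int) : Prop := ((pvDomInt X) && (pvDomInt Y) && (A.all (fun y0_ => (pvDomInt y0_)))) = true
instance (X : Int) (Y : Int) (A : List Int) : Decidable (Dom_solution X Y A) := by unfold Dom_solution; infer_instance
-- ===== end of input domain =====

-- B replaces A's interleaved two-counter forward scan by two phases: build the
-- prefix count-difference table, then search it from the right for the last zero.

-- ===== PORT A =====
-- A's forward loop over i in range(N), carrying result, nX, nY.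
def solutionLoop (X : Int) (Y : Int) : List Int → Int → Int → Int → Int → Int
  | [], _, result, _, _ => result
  | a :: l, i, result, nX, nY =>
    let nX' := if a = X then nX + 1 else nX
    let nY' := if a = Y then nY + 1 else nY
    let result' := if nX' = nY' then i else result
    solutionLoop X Y l (i + 1) result' nX' nY'

def solution (X : Int) (Y : Int) (A : List Int) : Int :=
  solutionLoop X Y A 0 (-1) 0 0

-- ===== PORT B =====
-- Phase 1 of B: the running prefix-difference table (the appends to `diffs`).
def diffTable (X : Int) (Y : Int) : Int → List Int → List Int
  | _, [] => []
  | s, a :: l =>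
    let s' := s + ((if a = X then (1 : Int) else 0) - (if a = Y then 1 else 0))
    s' :: diffTable X Y s' l

-- Phase 2 of B: the loop over range(len(diffs)-1, -1, -1) with early return,
-- expressed on the reversed table carrying the current index.
def rfindZero : List Int → Int → Int
  | [], _ => -1
  | v :: d, i => if v = 0 then i else rfindZero d (i - 1)

def solution_alt (X : Int) (Y : Int) (A : List Int) : Int :=
  rfindZero (diffTable X Y 0 A).reverse ((A.length : Int) - 1)

-- ===== PRECONDITION & SPEC =====
def Spec_solution (X : Int) (Y : Int) (A : List Int) (out : Int) : Prop := out = solution_alt X Y A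
instance (X : Int) (Y : Int) (A : List Int) (out : Int) : Decidable (Spec_solution X Y A out) := by unfold Spec_solution; infer_instance

-- ===== CLAIM (what is proved, stated in full; the proofs are below) =====
def Claim_equal_solution : Prop := ∀ (X : Int) (Y : Int) (A : List Int), Dom_solution X Y A → Spec_solution X Y A (solution X Y A)

-- ===== LEMMAS AND PROOFS =====

-- rfindZero with an explicit default, to push the "-1" through the recursion.
def rfindAux : List Int → Int → Int → Int
  | [], _, res => res
  | v :: d, i, res => if v = 0 then i else rfindAux d (i - 1) res

theorem rfindZero_eq_aux (d : List Int) (i : Int) : rfindZero d i = rfindAux d i (-1) := by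
  induction d generalizing i with
  | nil => rfl
  | cons v d ih => simp [rfindZero, rfindAux, ih]

theorem diffTable_length (X Y s : Int) (l : List Int) :
    (diffTable X Y s l).length = l.length := by
  induction l generalizing s with
  | nil => rfl
  | cons a l ih => simp [diffTable, ih]

theorem rfindAux_append (d : List Int) (v : Int) (j res : Int) :
    rfindAux (d ++ [v]) j res
      = rfindAux d j (if v = 0 then j - (d.length : Int) else res) := by
  induction d generalizing j with
  | nil => simp [rfindAux]
  | cons w d ih =>
    simp only [List.cons_append, rfindAux, ih]
    by_cases hw : w = 0
    · simp [hw]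
    · simp only [hw, if_false, List.length_cons]
      congr 2
      push_cast
      ring

theorem solutionLoop_eq (X Y : Int) (l : List Int) (i res nX nY : Int) :
    solutionLoop X Y l i res nX nY
      = rfindAux (diffTable X Y (nX - nY) l).reverse (i + (l.length : Int) - 1) res := by
  induction l generalizing i res nX nY with
  | nil => rfl
  | cons a l ih =>
    simp only [solutionLoop, diffTable, List.reverse_cons, List.length_cons]
    rw [rfindAux_append, ih]
    simp only [List.length_reverse, diffTable_length]
    have hcond : ((if a = X then nX + 1 else nX) = (if a = Y then nY + 1 else nY))
        ↔ (nX - nY + ((if a = X then (1:Int) else 0) - if a = Y then 1 else 0) = 0) := by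
      by_cases hx : a = X <;> by_cases hy : a = Y <;> simp [hx, hy] <;> (try split_ifs) <;> omega
    have hdiff : (if a = X then nX + 1 else nX) - (if a = Y then nY + 1 else nY)
        = nX - nY + ((if a = X then (1:Int) else 0) - if a = Y then 1 else 0) := by
      by_cases hx : a = X <;> by_cases hy : a = Y <;> simp [hx, hy] <;> (try split_ifs) <;> omega
    rw [hdiff]
    by_cases h : nX - nY + ((if a = X then (1:Int) else 0) - if a = Y then 1 else 0) = 0
    · rw [if_pos h, if_pos (hcond.mpr h)]
      congr 1 <;> push_cast <;> ring
    · rw [if_neg h, if_neg (fun hc => h (hcond.mp hc))]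
      congr 1
      push_cast; ring

-- ===== VERDICT (by name: the statement is the Claim_ definition above) =====
theorem solution_spec : Claim_equal_solution := by
  intro X Y A _
  unfold Spec_solution solution solution_alt
  rw [rfindZero_eq_aux, solutionLoop_eq]
  norm_num
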